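-- pv_equiv track=rewrite | github.com/Tsangares/DT5742 | binary.py | getCritialPoints
-- ===== SOURCE A (Python) =====
-- def getCritialPoints(waveform,threshold):
--     if not issubclass(type(waveform),list) or len(waveform) <= 1:
--         raise Exception("Waveform must be a list of points")
--     critialPoints=[]
--     for i,b in enumerate(waveform):
--         if i == 0: continue
--         a=waveform[i-1]
--         crossValue=cross(a,b,threshold)
--         if abs(crossValue) == 1:
--             critialPoints.append((i-1,crossValue))
--     return critialPoints
--
-- def cross(a,b,threshold):
--     if a < threshold and b > threshold:
--         return 1
--     if a > threshold and b < threshold: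
--         return -1
--     else: return 0
-- ===== SOURCE B (Python) =====
-- def getCritialPoints(waveform, threshold):
--     if not issubclass(type(waveform), list) or len(waveform) <= 1:
--         raise Exception("Waveform must be a list of points")
--     ups = [(i, 1) for i in range(len(waveform) - 1)
--            if waveform[i] < threshold < waveform[i + 1]]
--     downs = [(i, -1) for i in range(len(waveform) - 1)
--              if waveform[i] > threshold > waveform[i + 1]]
--     return sorted(ups + downs, key=lambda p: p[0])
-- ===== Notes on version B (the rewrite author's own statement) =====
-- stated objective: alternative
-- what changed: B replaces A's single stateful scan with cross() by two independent staged passes -- one comprehension collecting rising crossings, one collecting falling crossings -- whose concatenation is merged back into index order by a stable sort; correct because each index admits at most one crossing direction, so sorting by index reproduces A's in-order output.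
import Mathlib
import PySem

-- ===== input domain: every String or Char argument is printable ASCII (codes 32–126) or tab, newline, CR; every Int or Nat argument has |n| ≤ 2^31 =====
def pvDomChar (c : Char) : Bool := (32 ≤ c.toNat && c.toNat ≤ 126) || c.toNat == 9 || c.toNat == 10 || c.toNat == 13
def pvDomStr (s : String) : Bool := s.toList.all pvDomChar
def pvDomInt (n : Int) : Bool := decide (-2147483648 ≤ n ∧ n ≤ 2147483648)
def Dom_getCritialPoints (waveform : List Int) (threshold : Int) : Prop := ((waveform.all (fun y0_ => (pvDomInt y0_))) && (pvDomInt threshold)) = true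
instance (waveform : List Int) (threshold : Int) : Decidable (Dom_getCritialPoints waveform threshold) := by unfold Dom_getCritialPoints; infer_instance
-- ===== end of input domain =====

-- B replaces A's single scan with cross() by two staged comprehension passes (rising
-- and falling crossings) merged by a stable sort on the index (alternative decomposition).

-- ===== PORT A =====
-- helper cross(a, b, threshold)
def crossA (a b threshold : Int) : Int :=
  if a < threshold ∧ b > threshold then 1
  else if a > threshold ∧ b < threshold then -1
  else 0

-- one iteration of A's loop body (p = (i, b) from enumerate)
def stepA (waveform : List Int) (threshold : Int)
    (critialPoints : List (Int × Int)) (p : Int × Int) : List (Int × Int) :=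
  if p.1 = 0 then critialPoints
  else
    match PySem.List.pyGet? waveform (p.1 - 1) with  -- a = waveform[i-1]; always in range here
    | some a =>
        let crossValue := crossA a p.2 threshold
        if |crossValue| = 1 then critialPoints ++ [(p.1 - 1, crossValue)] else critialPoints
    | none => critialPoints

def getCritialPoints (waveform : List Int) (threshold : Int) : List (Int × Int) :=
  -- the 'raise' for len(waveform) <= 1 is excluded by Pre_getCritialPoints
  (PySem.List.enumerate waveform 0).foldl (stepA waveform threshold) []

-- ===== PORT B =====
-- ups comprehension: [(i, 1) for i in range(len(waveform)-1) if waveform[i] < threshold < waveform[i+1]]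
def upsB (waveform : List Int) (threshold : Int) : List (Int × Int) :=
  (PySem.List.pyRange 0 ((waveform.length : Int) - 1) 1).flatMap (fun i =>
    match PySem.List.pyGet? waveform i, PySem.List.pyGet? waveform (i + 1) with  -- always in range for i in the range
    | some a, some b => if a < threshold ∧ threshold < b then [(i, (1 : Int))] else []
    | _, _ => [])

-- downs comprehension: [(i, -1) for i in range(len(waveform)-1) if waveform[i] > threshold > waveform[i+1]]
def downsB (waveform : List Int) (threshold : Int) : List (Int × Int) :=
  (PySem.List.pyRange 0 ((waveform.length : Int) - 1) 1).flatMap (fun i =>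
    match PySem.List.pyGet? waveform i, PySem.List.pyGet? waveform (i + 1) with
    | some a, some b => if a > threshold ∧ threshold > b then [(i, (-1 : Int))] else []
    | _, _ => [])

def getCritialPoints_alt (waveform : List Int) (threshold : Int) : List (Int × Int) :=
  PySem.List.sorted (upsB waveform threshold ++ downsB waveform threshold) (fun p => p.1) false

-- ===== PRECONDITION & SPEC =====
-- Pre_ excludes exactly the inputs on which the Python A raises ("Waveform must be a list of points"): len(waveform) <= 1.
def Pre_getCritialPoints (waveform : List Int) (threshold : Int) : Prop := 2 ≤ waveform.length
instance (waveform : List Int) (threshold : Int) : Decidable (Pre_getCritialPoints waveform threshold) := by unfold Pre_getCritialPoints; infer_instance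
def pvWitness_getCritialPoints : List Int × Int := ([0, 2], 1)

def Spec_getCritialPoints (waveform : List Int) (threshold : Int) (out : List (Int × Int)) : Prop := out = getCritialPoints_alt waveform threshold
instance (waveform : List Int) (threshold : Int) (out : List (Int × Int)) : Decidable (Spec_getCritialPoints waveform threshold out) := by unfold Spec_getCritialPoints; infer_instance

-- ===== CLAIM (what is proved, stated in full; the proofs are below) =====
def Claim_equal_getCritialPoints : Prop := ∀ (waveform : List Int) (threshold : Int), Dom_getCritialPoints waveform threshold → Pre_getCritialPoints waveform threshold → Spec_getCritialPoints waveform threshold (getCritialPoints waveform threshold)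

-- ===== LEMMAS AND PROOFS =====

-- reference recursion on adjacent pairs, in A's terms
def pairsA (threshold : Int) (i : Int) : List Int → List (Int × Int)
  | a :: b :: rest =>
      (if |crossA a b threshold| = 1 then [(i, crossA a b threshold)] else [])
        ++ pairsA threshold (i + 1) (b :: rest)
  | _ => []

theorem stepA_val (wf : List Int) (t : Int) (k : Nat) (b prev : Int)
    (acc : List (Int × Int)) (hk : 1 ≤ k)
    (hget : PySem.List.pyGet? wf ((k : Int) - 1) = some prev) :
    stepA wf t acc ((k : Int), b)
      = if |crossA prev b t| = 1 then acc ++ [((k : Int) - 1, crossA prev b t)] else acc := by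
  unfold stepA
  have hk0 : ¬ (((k : Int), b).1 = 0) := by simp; omega
  rw [if_neg hk0]
  simp only [hget]

theorem foldA_eq (wf : List Int) (t : Int) :
    ∀ (rest : List Int) (k : Nat) (prev : Int) (acc : List (Int × Int)),
      1 ≤ k → wf.drop (k - 1) = prev :: rest →
      (PySem.List.enumerate rest (k : Int)).foldl (stepA wf t) acc
        = acc ++ pairsA t ((k : Int) - 1) (prev :: rest) := by
  intro rest
  induction rest with
  | nil => intro k prev acc hk _; simp [PySem.List.enumerate, pairsA]
  | cons b r ih =>
    intro k prev acc hk hdrop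
    have hget : PySem.List.pyGet? wf ((k : Int) - 1) = some prev := by
      have hc : ((k : Int) - 1) = ((k - 1 : Nat) : Int) := by omega
      rw [hc, PySem.List.pyGet?_natCast]
      have h0 : (wf.drop (k - 1))[0]? = some prev := by rw [hdrop]; rfl
      rw [List.getElem?_drop] at h0
      simpa using h0
    have hdrop' : wf.drop k = b :: r := by
      have h1 : (wf.drop (k - 1)).tail = wf.drop (k - 1 + 1) := by
        rw [← List.drop_drop, List.drop_one]
      rw [hdrop] at h1
      have hk1 : k - 1 + 1 = k := by omega
      rw [hk1] at h1
      exact h1.symm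
    rw [PySem.List.enumerate_cons, List.foldl_cons]
    rw [stepA_val wf t k b prev acc hk hget]
    have hcast : ((k : Int) + 1) = ((k + 1 : Nat) : Int) := by push_cast; ring
    rw [hcast]
    rw [ih (k + 1) b _ (by omega) (by simpa using hdrop')]
    simp only [pairsA]
    have h2 : ((k + 1 : Nat) : Int) - 1 = ((k : Int) - 1) + 1 := by push_cast; ring
    rw [h2]
    split_ifs with hcr <;> simp

-- A's fold equals the reference recursion
theorem getCritialPoints_eq_pairsA (wf : List Int) (t : Int) (h : 2 ≤ wf.length) :
    getCritialPoints wf t = pairsA t 0 wf := by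
  unfold getCritialPoints
  match wf, h with
  | a :: rest, h =>
    rw [PySem.List.enumerate_cons, List.foldl_cons]
    have h0 : stepA (a :: rest) t [] (0, a) = [] := by unfold stepA; simp
    rw [h0]
    have h := foldA_eq (a :: rest) t rest 1 a [] (by omega) (by simp)
    simpa using h

-- every element of pairsA has index ≥ i and direction ±1
theorem mem_pairsA (t : Int) : ∀ (l : List Int) (i : Int) (p : Int × Int),
    p ∈ pairsA t i l → i ≤ p.1 ∧ (p.2 = 1 ∨ p.2 = -1) := by
  intro l
  induction l with
  | nil => intro i p hp; simp [pairsA] at hp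
  | cons a rest ih =>
    intro i p hp
    cases rest with
    | nil => simp [pairsA] at hp
    | cons b r =>
      simp only [pairsA, List.mem_append] at hp
      rcases hp with hp | hp
      · split_ifs at hp with hcr
        · simp at hp
          subst hp
          constructor
          · omega
          · unfold crossA at hcr ⊢; split_ifs <;> simp_all
        · simp at hp
      · have := ih (i + 1) p hp
        exact ⟨by omega, this.2⟩

-- indices in pairsA are strictly increasing
theorem pairsA_pairwise (t : Int) : ∀ (l : List Int) (i : Int),
    (pairsA t i l).Pairwise (fun p q => p.1 < q.1) := by
  intro l
  induction l with
  | nil => intro i; simp [pairsA]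
  | cons a rest ih =>
    intro i
    cases rest with
    | nil => simp [pairsA]
    | cons b r =>
      simp only [pairsA]
      rw [List.pairwise_append]
      refine ⟨?_, ih (i + 1), ?_⟩
      · split_ifs <;> simp
      · intro p hp q hq
        obtain ⟨hq1, -⟩ := mem_pairsA t (b :: r) (i + 1) q hq
        split_ifs at hp <;> simp at hp
        subst hp; simp; omega

-- head element of each comprehension step, in pairsA's terms
theorem upHead (a b t i : Int) :
    (if a < t ∧ t < b then [(i, (1 : Int))] else [])
      = List.filter (fun p => p.2 == 1)
          (if |crossA a b t| = 1 then [(i, crossA a b t)] else []) := by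
  unfold crossA
  split_ifs <;> simp_all <;> omega

theorem downHead (a b t i : Int) :
    (if a > t ∧ t > b then [(i, (-1 : Int))] else [])
      = List.filter (fun p => p.2 == -1)
          (if |crossA a b t| = 1 then [(i, crossA a b t)] else []) := by
  unfold crossA
  split_ifs <;> simp_all <;> omega

-- B's ups pass is the dir-1 filter of pairsA
theorem upsB_eq (wf : List Int) (t : Int) :
    ∀ (l : List Int) (k : Nat), wf.drop k = l →
      (PySem.List.pyRange (k : Int) ((wf.length : Int) - 1) 1).flatMap (fun i =>
        match PySem.List.pyGet? wf i, PySem.List.pyGet? wf (i + 1) with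
        | some a, some b => if a < t ∧ t < b then [(i, (1 : Int))] else []
        | _, _ => [])
      = (pairsA t (k : Int) l).filter (fun p => p.2 == 1) := by
  intro l
  induction l with
  | nil =>
    intro k hdrop
    have hk : wf.length ≤ k := by
      have := congrArg List.length hdrop; simp at this; omega
    have : PySem.List.pyRange (k : Int) ((wf.length : Int) - 1) 1 = [] := by
      rw [PySem.List.pyRange_one]
      have : ((wf.length : Int) - 1 - k).toNat = 0 := by omega
      rw [this]; rfl
    rw [this]; rfl
  | cons a rest ih =>
    intro k hdrop
    have hka : wf[k]? = some a := by
      have h0 : (wf.drop k)[0]? = some a := by rw [hdrop]; rfl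
      rw [List.getElem?_drop] at h0; simpa using h0
    have hklt : k < wf.length := by
      obtain ⟨h, -⟩ := List.getElem?_eq_some_iff.mp hka; exact h
    cases rest with
    | nil =>
      have hlen : wf.length = k + 1 := by
        have := congrArg List.length hdrop; simp at this; omega
      have : PySem.List.pyRange (k : Int) ((wf.length : Int) - 1) 1 = [] := by
        rw [PySem.List.pyRange_one]
        have : ((wf.length : Int) - 1 - k).toNat = 0 := by omega
        rw [this]; rfl
      rw [this]; rfl
    | cons b r =>
      have hdrop' : wf.drop (k + 1) = b :: r := by
        have h1 : (wf.drop k).tail = wf.drop (k + 1) := by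
          rw [← List.drop_drop, List.drop_one]
        rw [hdrop] at h1; exact h1.symm
      have hkb : wf[k+1]? = some b := by
        have h0 : (wf.drop (k+1))[0]? = some b := by rw [hdrop']; rfl
        rw [List.getElem?_drop] at h0; simpa using h0
      have hlen : k + 2 ≤ wf.length := by
        obtain ⟨h, -⟩ := List.getElem?_eq_some_iff.mp hkb; omega
      have hcons : PySem.List.pyRange (k : Int) ((wf.length : Int) - 1) 1
          = (k : Int) :: PySem.List.pyRange ((k : Int) + 1) ((wf.length : Int) - 1) 1 :=
        PySem.List.pyRange_one_cons (by omega)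
      rw [hcons, List.flatMap_cons]
      have hgeta : PySem.List.pyGet? wf (k : Int) = some a := by
        rw [PySem.List.pyGet?_natCast]; exact hka
      have hgetb : PySem.List.pyGet? wf ((k : Int) + 1) = some b := by
        have : ((k : Int) + 1) = ((k + 1 : Nat) : Int) := by push_cast; ring
        rw [this, PySem.List.pyGet?_natCast]; exact hkb
      rw [hgeta, hgetb]
      have hcast : ((k : Int) + 1) = ((k + 1 : Nat) : Int) := by push_cast; ring
      rw [hcast, ih (k + 1) hdrop']
      simp only [pairsA, List.filter_append, ← hcast]
      congr 1
      exact upHead a b t (k : Int)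

-- B's downs pass is the dir-(-1) filter of pairsA
theorem downsB_eq (wf : List Int) (t : Int) :
    ∀ (l : List Int) (k : Nat), wf.drop k = l →
      (PySem.List.pyRange (k : Int) ((wf.length : Int) - 1) 1).flatMap (fun i =>
        match PySem.List.pyGet? wf i, PySem.List.pyGet? wf (i + 1) with
        | some a, some b => if a > t ∧ t > b then [(i, (-1 : Int))] else []
        | _, _ => [])
      = (pairsA t (k : Int) l).filter (fun p => p.2 == -1) := by
  intro l
  induction l with
  | nil =>
    intro k hdrop
    have hk : wf.length ≤ k := by
      have := congrArg List.length hdrop; simp at this; omega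
    have : PySem.List.pyRange (k : Int) ((wf.length : Int) - 1) 1 = [] := by
      rw [PySem.List.pyRange_one]
      have : ((wf.length : Int) - 1 - k).toNat = 0 := by omega
      rw [this]; rfl
    rw [this]; rfl
  | cons a rest ih =>
    intro k hdrop
    have hka : wf[k]? = some a := by
      have h0 : (wf.drop k)[0]? = some a := by rw [hdrop]; rfl
      rw [List.getElem?_drop] at h0; simpa using h0
    cases rest with
    | nil =>
      have hlen : wf.length = k + 1 := by
        have := congrArg List.length hdrop; simp at this; omega
      have : PySem.List.pyRange (k : Int) ((wf.length : Int) - 1) 1 = [] := by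
        rw [PySem.List.pyRange_one]
        have : ((wf.length : Int) - 1 - k).toNat = 0 := by omega
        rw [this]; rfl
      rw [this]; rfl
    | cons b r =>
      have hdrop' : wf.drop (k + 1) = b :: r := by
        have h1 : (wf.drop k).tail = wf.drop (k + 1) := by
          rw [← List.drop_drop, List.drop_one]
        rw [hdrop] at h1; exact h1.symm
      have hkb : wf[k+1]? = some b := by
        have h0 : (wf.drop (k+1))[0]? = some b := by rw [hdrop']; rfl
        rw [List.getElem?_drop] at h0; simpa using h0
      have hlen : k + 2 ≤ wf.length := by
        obtain ⟨h, -⟩ := List.getElem?_eq_some_iff.mp hkb; omega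
      have hcons : PySem.List.pyRange (k : Int) ((wf.length : Int) - 1) 1
          = (k : Int) :: PySem.List.pyRange ((k : Int) + 1) ((wf.length : Int) - 1) 1 :=
        PySem.List.pyRange_one_cons (by omega)
      rw [hcons, List.flatMap_cons]
      have hgeta : PySem.List.pyGet? wf (k : Int) = some a := by
        rw [PySem.List.pyGet?_natCast]; exact hka
      have hgetb : PySem.List.pyGet? wf ((k : Int) + 1) = some b := by
        have : ((k : Int) + 1) = ((k + 1 : Nat) : Int) := by push_cast; ring
        rw [this, PySem.List.pyGet?_natCast]; exact hkb
      rw [hgeta, hgetb]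
      have hcast : ((k : Int) + 1) = ((k + 1 : Nat) : Int) := by push_cast; ring
      rw [hcast, ih (k + 1) hdrop']
      simp only [pairsA, List.filter_append, ← hcast]
      congr 1
      exact downHead a b t (k : Int)

-- ===== VERDICT (by name: the statement is the Claim_ definition above) =====
theorem getCritialPoints_spec : Claim_equal_getCritialPoints := by
  intro wf t _ hpre
  unfold Spec_getCritialPoints getCritialPoints_alt
  unfold Pre_getCritialPoints at hpre
  rw [getCritialPoints_eq_pairsA wf t hpre]
  have hups : upsB wf t = (pairsA t 0 wf).filter (fun p => p.2 == 1) := by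
    have h := upsB_eq wf t wf 0 (by simp)
    simpa [upsB] using h
  have hdowns : downsB wf t = (pairsA t 0 wf).filter (fun p => p.2 == -1) := by
    have h := downsB_eq wf t wf 0 (by simp)
    simpa [downsB] using h
  have hperm : (pairsA t 0 wf).Perm (upsB wf t ++ downsB wf t) := by
    rw [hups, hdowns]
    have hd : (pairsA t 0 wf).filter (fun p => p.2 == -1)
        = (pairsA t 0 wf).filter (fun p => !(p.2 == 1)) := by
      apply List.filter_congr
      intro p hp
      have := (mem_pairsA t wf 0 p hp).2
      rcases this with h1 | h1 <;> simp [h1]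
    rw [hd]
    exact (List.filter_append_perm _ _).symm
  exact (PySem.List.sorted_eq_of_perm_of_pairwise_lt _ _ _ hperm (pairsA_pairwise t wf 0)).symm
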